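-- pv_equiv track=rewrite | github.com/LukeAndreesen/distributed_quantum_compiler | playground.py | update_maps
-- ===== SOURCE A (Python) =====
-- from collections import Counter, defaultdict
--
-- def update_maps(partition, layer_num, qpu_size):
--     layer = partition[layer_num]
--     # complete moving logic for easy state change checks
--     logical_to_qpu = {}
--     qpu_counter = Counter()
--     logical_to_physical = {}
--     # Assign each qubit to its distributed QPU
--     for logical_index, qpu_assignment in enumerate(layer):
--         # cast to int for clarity
--         logical_to_qpu[int(logical_index)] = qpu_assignment
--         logical_index, qpu_assignment = int(logical_index), int(qpu_assignment)
--       #  qpu_to_logical[qpu_assignment].append(logical_index)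
--         physical_map = (qpu_size * qpu_assignment) + qpu_counter[qpu_assignment]
--         qpu_counter[qpu_assignment] += 1
--         logical_to_physical[logical_index] = physical_map
--
--     return logical_to_qpu, logical_to_physical
-- ===== SOURCE B (Python) =====
-- from collections import defaultdict
--
-- def update_maps(partition, layer_num, qpu_size):
--     layer = partition[layer_num]
--     # Pass 1: record each qubit's QPU and group the logical indices by QPU.
--     logical_to_qpu = {}
--     groups = defaultdict(list)
--     for i, q in enumerate(layer):
--         logical_to_qpu[i] = q
--         groups[int(q)].append(i)
--     # Pass 2: each QPU's qubits get consecutive physical slots; write them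
--     # into a position table, then emit it in logical-index order.
--     phys = [0] * len(layer)
--     for qpu, members in groups.items():
--         base = qpu_size * qpu
--         for pos, i in enumerate(members):
--             phys[i] = base + pos
--     logical_to_physical = dict(enumerate(phys))
--     return logical_to_qpu, logical_to_physical
-- ===== Notes on version B (the rewrite author's own statement) =====
-- stated objective: alternative
-- what changed: Replaced A's single pass with a running per-QPU Counter by a two-stage grouping scheme: first build a qpu -> [logical indices] grouping table, then assign physical slots by enumerating each group's member list into a position array, emitted in index order.
import Mathlib
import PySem

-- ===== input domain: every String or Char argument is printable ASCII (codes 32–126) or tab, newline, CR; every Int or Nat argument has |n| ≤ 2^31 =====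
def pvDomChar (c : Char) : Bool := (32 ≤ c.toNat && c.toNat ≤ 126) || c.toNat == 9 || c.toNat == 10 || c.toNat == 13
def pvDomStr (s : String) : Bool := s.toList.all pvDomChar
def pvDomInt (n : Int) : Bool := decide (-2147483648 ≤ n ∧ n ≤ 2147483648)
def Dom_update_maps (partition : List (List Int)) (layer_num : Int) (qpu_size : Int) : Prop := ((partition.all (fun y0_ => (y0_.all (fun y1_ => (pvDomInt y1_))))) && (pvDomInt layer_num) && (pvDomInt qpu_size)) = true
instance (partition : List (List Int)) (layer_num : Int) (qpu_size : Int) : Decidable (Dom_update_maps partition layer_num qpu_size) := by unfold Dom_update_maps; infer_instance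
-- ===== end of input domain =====

-- B replaces A's single pass with a running per-QPU Counter by a two-stage grouping
-- scheme: group logical indices by QPU value, then assign physical slots by
-- enumerating each group into a position array (objective: alternative).


-- ===== PORT A =====
-- one loop over enumerate(layer) carrying (logical_to_qpu, qpu_counter, logical_to_physical)
def stepA (qpu_size : Int)
    (s : PySem.Dict Int Int × PySem.Dict Int Int × PySem.Dict Int Int)
    (iq : Int × Int) :
    PySem.Dict Int Int × PySem.Dict Int Int × PySem.Dict Int Int :=
  (s.1.insert iq.1 iq.2,
   s.2.1.modify iq.2 0 (· + 1),                                  -- qpu_counter[q] += 1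
   s.2.2.insert iq.1 (qpu_size * iq.2 + s.2.1.getD iq.2 0))      -- counter read BEFORE the increment

def update_maps (partition : List (List Int)) (layer_num : Int) (qpu_size : Int) : (List (Int × Int)) × (List (Int × Int)) :=
  let layer := (PySem.List.pyGet? partition layer_num).getD []   -- partition[layer_num]; none (IndexError) excluded by Pre_
  let st := (PySem.List.enumerate layer).foldl (stepA qpu_size)
    (PySem.Dict.empty, PySem.Dict.empty, PySem.Dict.empty)
  (st.1.items, st.2.2.items)

-- ===== PORT B =====
-- pass 1: logical_to_qpu insert + groups[int(q)].append(i)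
def stepB (s : PySem.Dict Int Int × PySem.Dict Int (List Int)) (iq : Int × Int) :
    PySem.Dict Int Int × PySem.Dict Int (List Int) :=
  (s.1.insert iq.1 iq.2, s.2.modify iq.2 [] (· ++ [iq.1]))

-- pass 2 inner loop: 'for pos, i in enumerate(members): phys[i] = base + pos'
-- (members hold nonnegative list indices, so '.toNat' is exact here)
def fillGroup (qpu_size : Int) (phys : List Int) (g : Int × List Int) : List Int :=
  (PySem.List.enumerate g.2).foldl (fun ph pr => ph.set pr.2.toNat (qpu_size * g.1 + pr.1)) phys

def update_maps_alt (partition : List (List Int)) (layer_num : Int) (qpu_size : Int) : (List (Int × Int)) × (List (Int × Int)) :=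
  let layer := (PySem.List.pyGet? partition layer_num).getD []   -- partition[layer_num]; none (IndexError) excluded by Pre_
  let st := (PySem.List.enumerate layer).foldl stepB (PySem.Dict.empty, PySem.Dict.empty)
  let phys := st.2.items.foldl (fillGroup qpu_size) (List.replicate layer.length 0)   -- phys = [0]*len(layer), filled per group
  let ltp := (PySem.List.enumerate phys).foldl (fun d pr => d.insert pr.1 pr.2) PySem.Dict.empty
  (st.1.items, ltp.items)

-- ===== PRECONDITION & SPEC =====
-- Pre_ excludes exactly the inputs where partition[layer_num] raises IndexError in Python.
def Pre_update_maps (partition : List (List Int)) (layer_num : Int) (qpu_size : Int) : Prop :=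
  PySem.Raise.InRange partition.length layer_num
instance (partition : List (List Int)) (layer_num : Int) (qpu_size : Int) : Decidable (Pre_update_maps partition layer_num qpu_size) := by unfold Pre_update_maps; infer_instance

def pvWitness_update_maps : List (List Int) × Int × Int := ([[0, 1, 0], [1, 1, 0]], 1, 2)

def Spec_update_maps (partition : List (List Int)) (layer_num : Int) (qpu_size : Int) (out : (List (Int × Int)) × (List (Int × Int))) : Prop := out = update_maps_alt partition layer_num qpu_size
instance (partition : List (List Int)) (layer_num : Int) (qpu_size : Int) (out : (List (Int × Int)) × (List (Int × Int))) : Decidable (Spec_update_maps partition layer_num qpu_size out) := by unfold Spec_update_maps; infer_instance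

-- ===== CLAIM (what is proved, stated in full; the proofs are below) =====
def Claim_equal_update_maps : Prop := ∀ (partition : List (List Int)) (layer_num : Int) (qpu_size : Int), Dom_update_maps partition layer_num qpu_size → Pre_update_maps partition layer_num qpu_size → Spec_update_maps partition layer_num qpu_size (update_maps partition layer_num qpu_size)

-- ===== LEMMAS AND PROOFS =====

-- proof-side names for the two kinds of inserts A's loop performs
def insQ (d : PySem.Dict Int Int) (iq : Int × Int) : PySem.Dict Int Int :=
  d.insert iq.1 iq.2

def insP (layer : List Int) (qpu_size : Int) (d : PySem.Dict Int Int) (iq : Int × Int) : PySem.Dict Int Int :=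
  d.insert iq.1 (qpu_size * iq.2 + ((PySem.List.slice layer none (some iq.1)).count iq.2 : Int))

-- indices of q in layer, and the physical slot A's counter computes for index k
def pdV (layer : List Int) (q : Int) (j : Nat) : Bool := layer.getD j 0 == q

def idxF (layer : List Int) (q : Int) : List Nat :=
  (List.range layer.length).filter (pdV layer q)

def tgt (qpu_size : Int) (layer : List Int) (k : Nat) : Int :=
  qpu_size * layer.getD k 0 + ((List.range k).countP (pdV layer (layer.getD k 0)) : Int)

-- A's fold, characterised: its first and third components are the insQ / insP folds
lemma foldA_eq (qpu_size : Int) (full : List Int) :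
    ∀ (rest pre : List Int) (d c p : PySem.Dict Int Int),
      full = pre ++ rest →
      (∀ q, c.getD q 0 = (pre.count q : Int)) →
      ((PySem.List.enumerate rest (pre.length : Int)).foldl (stepA qpu_size) (d, c, p)).1
        = (PySem.List.enumerate rest (pre.length : Int)).foldl insQ d
      ∧ ((PySem.List.enumerate rest (pre.length : Int)).foldl (stepA qpu_size) (d, c, p)).2.2
        = (PySem.List.enumerate rest (pre.length : Int)).foldl (insP full qpu_size) p := by
  intro rest
  induction rest with
  | nil => intro pre d c p _ _; simp [PySem.List.enumerate_nil]
  | cons q rest ih =>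
    intro pre d c p hfull hc
    rw [PySem.List.enumerate_cons]
    simp only [List.foldl_cons]
    have hstep : stepA qpu_size (d, c, p) ((pre.length : Int), q)
        = (d.insert (pre.length : Int) q,
           c.modify q 0 (· + 1),
           p.insert (pre.length : Int) (qpu_size * q + (pre.count q : Int))) := by
      simp [stepA, hc q]
    have hins : insP full qpu_size p ((pre.length : Int), q)
        = p.insert (pre.length : Int) (qpu_size * q + (pre.count q : Int)) := by
      have hslice : PySem.List.slice full none (some ((pre.length : Nat) : Int)) = pre := by
        rw [PySem.List.slice_to_natCast, hfull]
        exact List.take_left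
      simp [insP, hslice]
    have hc' : ∀ v, (c.modify q 0 (· + 1)).getD v 0 = (((pre ++ [q]).count v : Nat) : Int) := by
      intro v
      rw [PySem.Dict.getD_modify]
      by_cases hv : v = q
      · subst hv; simp [hc v, List.count_append]
      · simp [hv, hc v, List.count_append, Ne.symm hv]
    have hlen : ((pre.length : Int) + 1) = (((pre ++ [q]).length : Nat) : Int) := by
      simp [List.length_append]
    have := ih (pre ++ [q]) (d.insert (pre.length : Int) q) (c.modify q 0 (· + 1))
      (p.insert (pre.length : Int) (qpu_size * q + (pre.count q : Int)))
      (by simp [hfull]) hc'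
    rw [hstep, hins, insQ, hlen]
    exact this

-- prefix count of q = countP of the index predicate over range k
lemma count_take_eq_countP (layer : List Int) (q : Int) :
    ∀ k, k ≤ layer.length → (layer.take k).count q = (List.range k).countP (pdV layer q) := by
  intro k
  induction k with
  | zero => intro _; simp
  | succ k ih =>
    intro hk
    have hk' : k < layer.length := by omega
    rw [List.range_succ, List.take_add_one, List.count_append, List.countP_append, ih (by omega)]
    have : layer[k]?.toList = [layer[k]] := by simp [List.getElem?_eq_getElem hk']
    simp [pdV, List.getD_eq_getElem?_getD, List.getElem?_eq_getElem hk', List.count_singleton]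

-- the j-th index with property p: below n, satisfies p, and has rank j
lemma filter_range_spec (p : Nat → Bool) (n : Nat) :
    ∀ j k, (((List.range n).filter p)[j]? = some k) →
      k < n ∧ p k = true ∧ (List.range k).countP p = j := by
  induction n with
  | zero => intro j k h; simp at h
  | succ n ih =>
    intro j k h
    rw [List.range_succ, List.filter_append] at h
    by_cases hj : j < ((List.range n).filter p).length
    · rw [List.getElem?_append_left hj] at h
      have := ih j k h
      exact ⟨by omega, this.2.1, this.2.2⟩
    · rw [List.getElem?_append_right (by omega)] at h
      rw [List.filter_singleton] at h
      by_cases hp : p n = true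
      · rw [hp, cond_true] at h
        obtain ⟨hlt, hval⟩ := List.getElem?_eq_some_iff.mp h
        simp at hlt hval
        refine ⟨by omega, by rw [← hval]; exact hp, ?_⟩
        rw [← hval, List.countP_eq_length_filter]
        omega
      · rw [Bool.not_eq_true] at hp
        rw [hp, cond_false] at h
        simp at h

-- filling one group's members writes exactly the ranks, leaving the rest alone
lemma fill_one (qpu_size q : Int) (n : Nat) (p : Nat → Bool) :
    ∀ (F : List Nat) (s : Nat) (phys : List Int), phys.length = n →
      (∀ j k, F[j]? = some k → k < n ∧ (List.range k).countP p = s + j) →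
      ((PySem.List.enumerate (F.map (fun (m : Nat) => (m : Int))) (s : Int)).foldl
          (fun ph pr => ph.set pr.2.toNat (qpu_size * q + pr.1)) phys).length = n
      ∧ ∀ k, k < n →
        ((PySem.List.enumerate (F.map (fun (m : Nat) => (m : Int))) (s : Int)).foldl
          (fun ph pr => ph.set pr.2.toNat (qpu_size * q + pr.1)) phys)[k]? =
        if k ∈ F then some (qpu_size * q + ((List.range k).countP p : Int)) else phys[k]? := by
  intro F
  induction F with
  | nil => intro s phys hlen _; simp [PySem.List.enumerate_nil, hlen]
  | cons k₀ F' ih =>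
    intro s phys hlen hF
    have h0 := hF 0 k₀ (by simp)
    have hnotmem : k₀ ∉ F' := by
      intro hmem
      obtain ⟨j, hj, hget⟩ := List.mem_iff_getElem.mp hmem
      have := hF (j + 1) k₀ (by simpa using List.getElem?_eq_getElem hj ▸ congrArg some hget)
      omega
    rw [List.map_cons, PySem.List.enumerate_cons]
    simp only [List.foldl_cons, Int.toNat_natCast]
    have hs1 : ((s : Int) + 1) = ((s + 1 : Nat) : Int) := by push_cast; ring
    rw [hs1]
    have hF' : ∀ j k, F'[j]? = some k → k < n ∧ (List.range k).countP p = (s + 1) + j := by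
      intro j k h
      have := hF (j + 1) k (by simpa using h)
      exact ⟨this.1, by omega⟩
    have hIH := ih (s + 1) (phys.set k₀ (qpu_size * q + (s : Int))) (by simp [hlen]) hF'
    refine ⟨hIH.1, ?_⟩
    intro k hk
    rw [hIH.2 k hk]
    by_cases hmem : k ∈ F'
    · simp [hmem, List.mem_cons]
    · by_cases hk0 : k = k₀
      · subst hk0
        simp [hmem, hlen, h0.1]
        omega
      · simp [hmem, hk0, Ne.symm hk0]

-- filling every group in turn produces A's counter values everywhere
lemma fill_groups (qpu_size : Int) (layer : List Int) :
    ∀ (Qs : List Int) (phys : List Int), phys.length = layer.length →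
      (Qs.foldl (fun ph q => fillGroup qpu_size ph (q, (idxF layer q).map (fun (m : Nat) => (m : Int)))) phys).length = layer.length
      ∧ ∀ k, k < layer.length →
        (Qs.foldl (fun ph q => fillGroup qpu_size ph (q, (idxF layer q).map (fun (m : Nat) => (m : Int)))) phys)[k]? =
        if layer.getD k 0 ∈ Qs then some (tgt qpu_size layer k) else phys[k]? := by
  intro Qs
  induction Qs with
  | nil => intro phys hlen; simp [hlen]
  | cons q Qs' ih =>
    intro phys hlen
    simp only [List.foldl_cons]
    have hone := fill_one qpu_size q layer.length (pdV layer q) (idxF layer q) 0 phys hlen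
      (by
        intro j k h
        have := filter_range_spec (pdV layer q) layer.length j k h
        exact ⟨this.1, by omega⟩)
    have hfill : fillGroup qpu_size phys (q, (idxF layer q).map (fun (m : Nat) => (m : Int)))
        = (PySem.List.enumerate ((idxF layer q).map (fun (m : Nat) => (m : Int))) ((0 : Nat) : Int)).foldl
            (fun ph pr => ph.set pr.2.toNat (qpu_size * q + pr.1)) phys := by
      simp [fillGroup]
    rw [hfill]
    have hIH := ih _ hone.1
    refine ⟨hIH.1, ?_⟩
    intro k hk
    rw [hIH.2 k hk, hone.2 k hk]
    have hmemF : k ∈ idxF layer q ↔ layer.getD k 0 = q := by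
      simp [idxF, pdV, List.mem_filter, List.mem_range, hk]
    simp only [List.mem_cons]
    by_cases h1 : layer.getD k 0 ∈ Qs'
    · rw [if_pos h1, if_pos (Or.inr h1)]
    · rw [if_neg h1]
      by_cases h2 : layer.getD k 0 = q
      · rw [if_pos (hmemF.mpr h2), if_pos (Or.inl h2)]
        simp only [tgt, h2]
      · rw [if_neg (fun hm => h2 (hmemF.mp hm)),
          if_neg (by intro hor; rcases hor with h | h; exact h2 h; exact h1 h)]

-- the groups dict holds, for each value q, the indices of q in order
lemma groups_getD (layer : List Int) (q : Int) :
    (((PySem.List.enumerate layer).foldl (fun g (p : Int × Int) => g.modify p.2 [] (· ++ [p.1])) PySem.Dict.empty).getD q [])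
      = (idxF layer q).map (fun (m : Nat) => (m : Int)) := by
  have hswap : (PySem.List.enumerate layer).foldl (fun g (p : Int × Int) => g.modify p.2 [] (· ++ [p.1])) PySem.Dict.empty
      = (((PySem.List.enumerate layer).map Prod.swap).foldl (fun g (p : Int × Int) => g.modify p.1 [] (· ++ [p.2])) PySem.Dict.empty) := by
    rw [List.foldl_map]
    simp only [Prod.fst_swap, Prod.snd_swap]
  rw [hswap, PySem.Dict.getD_foldl_modify_append]
  have henum : (PySem.List.enumerate layer).map Prod.swap
      = (List.range layer.length).map (fun k => (layer.getD k 0, (k : Int))) := by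
    rw [PySem.List.enumerate_eq_map_pyRange layer 0, PySem.List.len]
    rw [PySem.List.pyRange_zero_natCast, List.map_map, List.map_map]
    refine List.map_congr_left ?_
    intro k _
    simp [Prod.swap, PySem.List.pyGetD_natCast]
  rw [henum, List.filter_map, List.map_map]
  simp only [PySem.Dict.getD_empty, List.nil_append, idxF]
  rfl

-- the groups dict's items list is one entry per distinct value, in first-occurrence order
lemma groups_items (layer : List Int) :
    (((PySem.List.enumerate layer).foldl (fun g (p : Int × Int) => g.modify p.2 [] (· ++ [p.1])) PySem.Dict.empty).items)
      = (PySem.Set.ofList layer).map (fun q => (q, (idxF layer q).map (fun (m : Nat) => (m : Int)))) := by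
  have hkeys : (((PySem.List.enumerate layer).foldl (fun g (p : Int × Int) => g.modify p.2 [] (· ++ [p.1])) PySem.Dict.empty).keys)
      = PySem.Set.ofList layer := by
    rw [PySem.Dict.keys_foldl_modify_key (PySem.List.enumerate layer) (fun p => p.2) []
      (fun _ p => (· ++ [p.1])) PySem.Dict.empty]
    rw [PySem.List.map_snd_enumerate]
    rfl
  have hnodup := PySem.Dict.nodup_keys_foldl_modify_key (PySem.List.enumerate layer) (fun p : Int × Int => p.2) []
    (fun _ p => (· ++ [p.1])) PySem.Dict.empty (by simp)
  rw [PySem.Dict.items_eq_map_keys _ hnodup [], hkeys]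
  exact List.map_congr_left (fun q _ => by rw [groups_getD])

-- ===== VERDICT (by name: the statement is the Claim_ definition above) =====
theorem update_maps_spec : Claim_equal_update_maps := by
  intro partition layer_num qpu_size _ _
  unfold Spec_update_maps update_maps update_maps_alt
  set layer := (PySem.List.pyGet? partition layer_num).getD [] with hlayer
  -- A's two result dicts
  have hA := foldA_eq qpu_size layer layer [] PySem.Dict.empty PySem.Dict.empty PySem.Dict.empty
    (by simp) (by intro q; simp [PySem.Dict.getD_empty])
  simp only [List.length_nil, Nat.cast_zero] at hA
  -- B's pass 1 splits into the same insQ fold and the groups fold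
  have hB : (PySem.List.enumerate layer).foldl stepB (PySem.Dict.empty, PySem.Dict.empty)
      = ((PySem.List.enumerate layer).foldl insQ PySem.Dict.empty,
         (PySem.List.enumerate layer).foldl (fun g (p : Int × Int) => g.modify p.2 [] (· ++ [p.1])) PySem.Dict.empty) :=
    PySem.List.foldl_prod_mk insQ (fun g (p : Int × Int) => g.modify p.2 [] (· ++ [p.1]))
      (PySem.List.enumerate layer) PySem.Dict.empty PySem.Dict.empty
  -- the filled position list
  set phys := ((PySem.Set.ofList layer).map (fun q => (q, (idxF layer q).map (fun (m : Nat) => (m : Int))))).foldl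
      (fillGroup qpu_size) (List.replicate layer.length 0) with hphys
  have hfold : phys = (PySem.Set.ofList layer).foldl
      (fun ph q => fillGroup qpu_size ph (q, (idxF layer q).map (fun (m : Nat) => (m : Int))))
      (List.replicate layer.length 0) := by
    rw [hphys, List.foldl_map]
  have hfg := fill_groups qpu_size layer (PySem.Set.ofList layer) (List.replicate layer.length 0)
    (by simp)
  have hlen : phys.length = layer.length := by rw [hfold]; exact hfg.1
  have hval : ∀ k, k < layer.length → phys[k]? = some (tgt qpu_size layer k) := by
    intro k hk
    rw [hfold, hfg.2 k hk]
    have hmem : layer.getD k 0 ∈ layer := by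
      rw [List.getD_eq_getElem _ _ hk]; exact List.getElem_mem hk
    rw [if_pos ((PySem.Set.mem_ofList _ _).mpr hmem)]
  -- the enumerate of phys is exactly the list of (index, slot) pairs A inserts
  have hLeq : (PySem.List.enumerate layer).map
        (fun pr : Int × Int => (pr.1, qpu_size * pr.2 + ((PySem.List.slice layer none (some pr.1)).count pr.2 : Int)))
      = PySem.List.enumerate phys := by
    apply List.ext_getElem?
    intro k
    by_cases hk : k < layer.length
    · rw [List.getElem?_map]
      rw [List.getElem?_eq_getElem (by simp [PySem.List.length_enumerate]; exact hk)]
      rw [List.getElem?_eq_getElem (by simp [PySem.List.length_enumerate, hlen]; exact hk)]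
      rw [PySem.List.getElem_enumerate layer 0 k (by simp [PySem.List.length_enumerate]; exact hk)]
      rw [PySem.List.getElem_enumerate phys 0 k (by simp [PySem.List.length_enumerate, hlen]; exact hk)]
      have hvk : phys[k]'(by omega) = tgt qpu_size layer k := by
        have := hval k hk
        rw [List.getElem?_eq_getElem (by omega)] at this
        exact Option.some.inj this
      simp only [Option.map_some, Option.some.injEq, zero_add]
      rw [hvk]
      simp only [tgt, PySem.List.slice_to_natCast]
      rw [count_take_eq_countP layer _ k (by omega)]
      simp [List.getD_eq_getElem?_getD, List.getElem?_eq_getElem hk]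
    · rw [List.getElem?_map]
      rw [List.getElem?_eq_none (by simp [PySem.List.length_enumerate]; omega)]
      rw [List.getElem?_eq_none (by simp [PySem.List.length_enumerate]; omega)]
      rfl
  -- assemble: first components are the same fold, second components fold the same list
  refine Prod.ext ?_ ?_
  · simp only [hA.1, hB]
  · simp only [hA.2, hB, groups_items]
    rw [← hphys, ← hLeq, List.foldl_map]
    rfl
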